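-- pv_equiv track=rewrite | github.com/Taoge123/OptimizedLeetcode | LeetcodeNew/python/LC_795.py | count
-- ===== SOURCE A (Python) =====
-- def count(A, bound):
--     res = cur = 0
--     for num in A:
--         if num <= bound:
--             cur += 1
--         else:
--             cur = 0
--         res += cur
--     return res
-- ===== SOURCE B (Python) =====
-- def count(A, bound):
--     # staged: find cut positions, then sum triangular numbers of the gaps
--     cuts = [i for i, x in enumerate(A) if x > bound]
--     edges = [-1] + cuts + [len(A)]
--     total = 0
--     for prev, nxt in zip(edges, edges[1:]):
--         gap = nxt - prev - 1
--         total += gap * (gap + 1) // 2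
--     return total
-- ===== Notes on version B (the rewrite author's own statement) =====
-- stated objective: alternative
-- what changed: B drops A's per-element running counter entirely: it first collects the index list of elements > bound, then computes the answer from the gaps between consecutive boundary indices (triangular number per gap) by zipping the edge list with its shift.
import Mathlib
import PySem

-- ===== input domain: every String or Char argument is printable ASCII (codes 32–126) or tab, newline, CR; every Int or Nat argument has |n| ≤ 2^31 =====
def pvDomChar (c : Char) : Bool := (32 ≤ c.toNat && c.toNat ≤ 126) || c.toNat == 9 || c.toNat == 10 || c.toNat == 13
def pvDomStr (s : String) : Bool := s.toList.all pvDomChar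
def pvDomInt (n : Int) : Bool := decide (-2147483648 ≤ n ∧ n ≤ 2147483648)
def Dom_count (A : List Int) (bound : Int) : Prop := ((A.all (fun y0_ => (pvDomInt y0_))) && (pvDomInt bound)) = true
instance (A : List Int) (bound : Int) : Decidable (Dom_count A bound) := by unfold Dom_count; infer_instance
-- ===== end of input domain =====

-- B replaces A's per-element running counter by a staged computation: collect the indices of
-- elements > bound, then sum a triangular number per gap between consecutive boundary indices
-- (objective: alternative).

-- ===== PORT A =====
-- state (res, cur): cur' = cur+1 if num ≤ bound else 0; res += cur'
def count (A : List Int) (bound : Int) : Int :=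
  (A.foldl (fun (s : Int × Int) num =>
    if num ≤ bound then (s.1 + (s.2 + 1), s.2 + 1) else (s.1, 0)) (0, 0)).1

-- ===== PORT B =====
-- gap * (gap + 1) // 2
def pvTriB (g : Int) : Int := PySem.Int.floordiv (g * (g + 1)) 2

-- cuts = indices of elements > bound; edges = [-1] ++ cuts ++ [len A];
-- total = sum over consecutive edge pairs (zip edges edges[1:]) of tri(nxt - prev - 1)
def count_alt (A : List Int) (bound : Int) : Int :=
  let cuts := (PySem.List.enumerate A).filterMap (fun p => if p.2 > bound then some p.1 else none)
  let edges := (-1 : Int) :: cuts ++ [(A.length : Int)]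
  (List.zip edges (edges.drop 1)).foldl (fun total p => total + pvTriB (p.2 - p.1 - 1)) 0

-- ===== PRECONDITION & SPEC =====
def Spec_count (A : List Int) (bound : Int) (out : Int) : Prop := out = count_alt A bound
instance (A : List Int) (bound : Int) (out : Int) : Decidable (Spec_count A bound out) := by unfold Spec_count; infer_instance

-- ===== CLAIM (what is proved, stated in full; the proofs are below) =====
def Claim_equal_count : Prop := ∀ (A : List Int) (bound : Int), Dom_count A bound → Spec_count A bound (count A bound)

-- ===== LEMMAS AND PROOFS =====

theorem pvTriB_succ (L : Int) : pvTriB (L + 1) = pvTriB L + (L + 1) := by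
  unfold pvTriB
  rw [PySem.Int.floordiv_eq_ediv_of_pos (by omega), PySem.Int.floordiv_eq_ediv_of_pos (by omega)]
  have h1 : (L + 1) * (L + 1 + 1) = L * (L + 1) + 2 * (L + 1) := by ring
  rw [h1]; omega

theorem pvTriB_zero : pvTriB 0 = 0 := by decide

-- the cut indices, as a structural recursion with starting index i
def pvCuts (bound : Int) (i : Int) : List Int → List Int
  | [] => []
  | x :: xs => if x > bound then i :: pvCuts bound (i + 1) xs else pvCuts bound (i + 1) xs

theorem pvCuts_eq_filterMap (bound : Int) (l : List Int) : ∀ (i : Int),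
    (PySem.List.enumerate l i).filterMap (fun p => if p.2 > bound then some p.1 else none)
    = pvCuts bound i l := by
  induction l with
  | nil => intro i; simp [PySem.List.enumerate_nil, pvCuts]
  | cons x xs ih =>
    intro i
    rw [PySem.List.enumerate_cons]
    by_cases hx : x > bound
    · simp [hx, pvCuts, ih]
    · simp [hx, pvCuts, ih]

-- the gap sum over an edge list, as a structural recursion carrying the previous edge
def pvGapSum (prev : Int) : List Int → Int
  | [] => 0
  | e :: t => pvTriB (e - prev - 1) + pvGapSum e t

theorem zip_foldl_eq_gapSum (rest : List Int) : ∀ (prev acc : Int),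
    (List.zip (prev :: rest) ((prev :: rest).drop 1)).foldl
      (fun total p => total + pvTriB (p.2 - p.1 - 1)) acc
    = acc + pvGapSum prev rest := by
  induction rest with
  | nil => intro prev acc; simp [pvGapSum]
  | cons e t ih =>
    intro prev acc
    simp only [List.drop_one, List.tail_cons, List.zip_cons_cons, List.foldl_cons]
    have := ih e (acc + pvTriB (e - prev - 1))
    simp only [List.drop_one, List.tail_cons] at this
    rw [this, pvGapSum]; ring

-- loop invariant for A's fold: with current run length c and accumulated res r, the final
-- result equals r - tri c plus the gap sum of the remaining cuts with previous edge i - c - 1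
theorem count_loop_inv (bound : Int) (l : List Int) : ∀ (i r c : Int),
    (l.foldl (fun (s : Int × Int) num =>
        if num ≤ bound then (s.1 + (s.2 + 1), s.2 + 1) else (s.1, 0)) (r, c)).1
    = r - pvTriB c + pvGapSum (i - c - 1) (pvCuts bound i l ++ [i + l.length]) := by
  induction l with
  | nil =>
    intro i r c
    simp only [List.foldl_nil, pvCuts, List.nil_append, List.length_nil, pvGapSum]
    have h : i + (0 : Int) - (i - c - 1) - 1 = c := by ring
    push_cast
    rw [h]; ring
  | cons x xs ih =>
    intro i r c
    simp only [List.foldl_cons]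
    by_cases hx : x ≤ bound
    · rw [if_pos hx]
      have hc : ¬ (x > bound) := by omega
      have := ih (i + 1) (r + (c + 1)) (c + 1)
      simp only [pvCuts, if_neg hc, List.length_cons] at this ⊢
      rw [this, pvTriB_succ]
      have h1 : i + 1 - (c + 1) - 1 = i - c - 1 := by ring
      have h2 : (i + 1) + (xs.length : Int) = i + ((xs.length : Int) + 1) := by ring
      rw [h1, h2]
      push_cast
      ring_nf
    · rw [if_neg hx]
      have hc : x > bound := by omega
      have := ih (i + 1) r 0
      simp only [pvCuts, if_pos hc, List.length_cons] at this ⊢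
      rw [this, pvTriB_zero]
      simp only [List.cons_append, pvGapSum]
      have h1 : i - (i - c - 1) - 1 = c := by ring
      have h2 : i + 1 - 0 - 1 = i := by ring
      have h3 : (i + 1) + (xs.length : Int) = i + ((xs.length : Int) + 1) := by ring
      rw [h1, h2, h3]
      push_cast
      ring_nf

-- ===== VERDICT (by name: the statement is the Claim_ definition above) =====
theorem count_spec : Claim_equal_count := by
  intro A bound _
  unfold Spec_count count count_alt
  rw [pvCuts_eq_filterMap]
  have hb := zip_foldl_eq_gapSum (pvCuts bound 0 A ++ [(A.length : Int)]) (-1) 0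
  simp only [List.cons_append] at hb ⊢
  rw [hb]
  have ha := count_loop_inv bound A 0 0 0
  rw [pvTriB_zero] at ha
  simpa using ha
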